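-- pv_equiv track=rewrite | github.com/nakodil/yandex_olympiad_2023 | singing_robot.py | shift_prev
-- ===== SOURCE A (Python) =====
-- def is_alterate(word: list) -> bool:
--     for i in range(len(word) - 1):
--         if word[i] == word[i + 1]:
--             return False
--     return True
--
-- def shift_prev(nums: list) -> None:
--     changes = 0
--     for i in range(1, len(nums)):
--         if is_alterate(nums):
--             return changes
--         if nums[i] == nums[i - 1]:
--             nums[i] *= -1
--             changes += 1
--     return changes
-- ===== SOURCE B (Python) =====
-- def shift_prev(nums):
--     changes = 0
--     if not nums:
--         return 0
--     prev = nums[0]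
--     for x in nums[1:]:
--         if x == prev:
--             x = -x
--             changes += 1
--         prev = x
--     return changes
-- ===== Notes on version B (the rewrite author's own statement) =====
-- stated objective: faster
-- what changed: Single forward pass keeping the previous (possibly flipped) value in an accumulator, instead of re-scanning the whole array for alternation at every loop step and mutating it in place; A's in-place mutation of nums is not reproduced (return value equivalence only).
import Mathlib
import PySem

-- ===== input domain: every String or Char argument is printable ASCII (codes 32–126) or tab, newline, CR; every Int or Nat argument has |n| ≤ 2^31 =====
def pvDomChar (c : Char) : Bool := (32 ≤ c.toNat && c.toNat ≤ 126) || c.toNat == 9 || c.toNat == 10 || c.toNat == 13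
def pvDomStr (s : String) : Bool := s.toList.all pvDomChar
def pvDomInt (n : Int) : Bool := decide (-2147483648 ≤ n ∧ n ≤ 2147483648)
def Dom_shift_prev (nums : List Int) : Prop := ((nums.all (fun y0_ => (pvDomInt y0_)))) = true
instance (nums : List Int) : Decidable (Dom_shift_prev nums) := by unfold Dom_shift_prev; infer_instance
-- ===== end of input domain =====

-- B replaces A's quadratic rescan-and-mutate loop by one forward pass with a
-- previous-value accumulator (return value equivalence only: A flips entries of
-- nums in place, B does not mutate its argument).


-- ===== PORT A =====
-- helper: is_alterate(word) — all adjacent pairs distinct (indices always in range)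
def is_alterate (word : List Int) : Bool :=
  (List.range (word.length - 1)).all (fun i => !(word[i]! == word[i + 1]!))

-- loop body of A: state = (nums, changes, early-returned value)
def shiftStep (st : List Int × Int × Option Int) (i : Nat) : List Int × Int × Option Int :=
  match st with
  | (ns, ch, some r) => (ns, ch, some r)
  | (ns, ch, none) =>
    if is_alterate ns then (ns, ch, some ch)
    else if ns[i]! = ns[i - 1]! then (ns.set i (-(ns[i]!)), ch + 1, none)
    else (ns, ch, none)

def shift_prev (nums : List Int) : Int :=
  let s := (List.range' 1 (nums.length - 1)).foldl shiftStep (nums, 0, none)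
  s.2.2.getD s.2.1

-- ===== PORT B =====
-- loop body of B: state = (prev, changes)
def altStep (st : Int × Int) (x : Int) : Int × Int :=
  if x = st.1 then (-x, st.2 + 1) else (x, st.2)

def shift_prev_alt (nums : List Int) : Int :=
  match nums with
  | [] => 0
  | x :: xs => (xs.foldl altStep (x, 0)).2

-- ===== PRECONDITION & SPEC =====
def Spec_shift_prev (nums : List Int) (out : Int) : Prop := out = shift_prev_alt nums
instance (nums : List Int) (out : Int) : Decidable (Spec_shift_prev nums out) := by unfold Spec_shift_prev; infer_instance

-- ===== CLAIM (what is proved, stated in full; the proofs are below) =====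
def Claim_equal_shift_prev : Prop := ∀ (nums : List Int), Dom_shift_prev nums → Spec_shift_prev nums (shift_prev nums)

-- ===== LEMMAS AND PROOFS =====

-- A's loop body with the early-exit bookkeeping stripped
def gStep (st : List Int × Int) (i : Nat) : List Int × Int :=
  if st.1[i]! = st.1[i - 1]! then (st.1.set i (-(st.1[i]!)), st.2 + 1) else st

-- reference count and the list A's mutation produces, in B's recursion shape
def bspec : Int → List Int → Int
  | _, [] => 0
  | prev, y :: ys => if y = prev then 1 + bspec (-y) ys else bspec y ys

def fixList : Int → List Int → List Int
  | _, [] => []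
  | prev, y :: ys => if y = prev then (-y) :: fixList (-y) ys else y :: fixList y ys

theorem bfold_eq (xs : List Int) (prev ch : Int) :
    (xs.foldl altStep (prev, ch)).2 = ch + bspec prev xs := by
  induction xs generalizing prev ch with
  | nil => simp [bspec]
  | cons y ys ih =>
    simp only [List.foldl_cons, altStep, bspec]
    by_cases h : y = prev <;> simp [h, ih] <;> ring

theorem get_bang_append (pre l : List Int) (k : Nat) :
    (pre ++ l)[pre.length + k]! = l[k]! := by
  simp [List.getElem!_eq_getElem?_getD, List.getElem?_append_right (Nat.le_add_right _ _)]

theorem set_append (pre l : List Int) (k : Nat) (a : Int) :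
    (pre ++ l).set (pre.length + k) a = pre ++ l.set k a := by
  induction pre with
  | nil => simp
  | cons p ps ih => simp [Nat.succ_add, List.set, ih]

theorem gfold_eq (rest pre : List Int) (prev ch : Int) :
    (List.range' (pre.length + 1) rest.length).foldl gStep (pre ++ prev :: rest, ch)
      = (pre ++ prev :: fixList prev rest, ch + bspec prev rest) := by
  induction rest generalizing pre prev ch with
  | nil => simp [fixList, bspec]
  | cons y ys ih =>
    have hget1 : (pre ++ prev :: y :: ys)[pre.length + 1]! = y := by
      have := get_bang_append pre (prev :: y :: ys) 1
      simpa using this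
    have hget0 : (pre ++ prev :: y :: ys)[pre.length + 1 - 1]! = prev := by
      have := get_bang_append pre (prev :: y :: ys) 0
      simpa using this
    simp only [List.length_cons, List.range'_succ, List.foldl_cons]
    by_cases h : y = prev
    · have hset : (pre ++ prev :: y :: ys).set (pre.length + 1) (-y)
          = (pre ++ [prev]) ++ (-y) :: ys := by
        have := set_append pre (prev :: y :: ys) 1 (-y)
        simpa [List.set] using this
      have hg : gStep (pre ++ prev :: y :: ys, ch) (pre.length + 1)
          = ((pre ++ [prev]) ++ (-y) :: ys, ch + 1) := by
        simp [gStep, hget1, hget0, h, hset]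
      rw [hg]
      have ih' := ih (pre ++ [prev]) (-y) (ch + 1)
      simp only [List.length_append, List.length_cons, List.length_nil, Nat.zero_add] at ih'
      rw [ih']
      simp [fixList, bspec, h, List.append_assoc]
      ring
    · have hg : gStep (pre ++ prev :: y :: ys, ch) (pre.length + 1)
          = (pre ++ prev :: y :: ys, ch) := by
        simp [gStep, hget1, hget0, h]
      rw [hg]
      have ih' := ih (pre ++ [prev]) y ch
      simp only [List.length_append, List.length_cons, List.length_nil, Nat.zero_add] at ih'
      have hre2 : pre ++ prev :: y :: ys = (pre ++ [prev]) ++ y :: ys := by simp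
      rw [hre2, ih']
      simp [fixList, bspec, h, List.append_assoc]

theorem alterate_no_flip (ns : List Int) (h : is_alterate ns = true)
    (i : Nat) (h1 : 1 ≤ i) (h2 : i < ns.length) :
    ns[i]?.getD 0 ≠ ns[i - 1]?.getD 0 := by
  have hd : (default : Int) = 0 := rfl
  rw [← hd, ← List.getElem!_eq_getElem?_getD, ← List.getElem!_eq_getElem?_getD]
  have hmem : i - 1 < ns.length - 1 := by omega
  have := (List.all_eq_true.mp h) (i - 1) (List.mem_range.mpr hmem)
  simp only [Bool.not_eq_eq_eq_not, Bool.not_true, beq_eq_false_iff_ne, ne_eq] at this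
  have : ns[i - 1]! ≠ ns[i - 1 + 1]! := by simpa using this
  have hi : i - 1 + 1 = i := by omega
  rw [hi] at this
  exact Ne.symm this

theorem gfold_frozen (l : List Nat) (ns : List Int) (ch : Int)
    (h : is_alterate ns = true) (hv : ∀ i ∈ l, 1 ≤ i ∧ i < ns.length) :
    l.foldl gStep (ns, ch) = (ns, ch) := by
  induction l with
  | nil => rfl
  | cons i l' ih =>
    have hi := hv i (List.mem_cons_self)
    have hg : gStep (ns, ch) i = (ns, ch) := by
      simp only [gStep]
      rw [if_neg (by simpa [List.getElem!_eq_getElem?_getD] using alterate_no_flip ns h i hi.1 hi.2)]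
    rw [List.foldl_cons, hg]
    exact ih (fun j hj => hv j (List.mem_cons_of_mem _ hj))

theorem ffold_frozen (l : List Nat) (ns : List Int) (ch : Int) (r : Int) :
    l.foldl shiftStep (ns, ch, some r) = (ns, ch, some r) := by
  induction l with
  | nil => rfl
  | cons i l' ih => simpa [shiftStep] using ih

def res3 (s : List Int × Int × Option Int) : Int := s.2.2.getD s.2.1

theorem ffold_eq_gfold (l : List Nat) (ns : List Int) (ch : Int)
    (hv : ∀ i ∈ l, 1 ≤ i ∧ i < ns.length) :
    res3 (l.foldl shiftStep (ns, ch, none)) = (l.foldl gStep (ns, ch)).2 := by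
  induction l generalizing ns ch with
  | nil => rfl
  | cons i l' ih =>
    have hi := hv i (List.mem_cons_self)
    have hv' : ∀ j ∈ l', 1 ≤ j ∧ j < ns.length := fun j hj => hv j (List.mem_cons_of_mem _ hj)
    by_cases ha : is_alterate ns = true
    · have hf : shiftStep (ns, ch, none) i = (ns, ch, some ch) := by
        simp [shiftStep, ha]
      have hg : gStep (ns, ch) i = (ns, ch) := by
        simp only [gStep]
        rw [if_neg (by simpa [List.getElem!_eq_getElem?_getD] using alterate_no_flip ns ha i hi.1 hi.2)]
      rw [List.foldl_cons, hf, ffold_frozen, List.foldl_cons, hg,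
        gfold_frozen l' ns ch ha hv']
      rfl
    · by_cases he : ns[i]! = ns[i - 1]!
      · have hf : shiftStep (ns, ch, none) i = (ns.set i (-(ns[i]!)), ch + 1, none) := by
          simp only [shiftStep, ha, Bool.false_eq_true, if_false]
          rw [if_pos he]
        have hg : gStep (ns, ch) i = (ns.set i (-(ns[i]!)), ch + 1) := by
          simp only [gStep]
          rw [if_pos he]
        rw [List.foldl_cons, hf, List.foldl_cons, hg]
        exact ih _ _ (by simpa using hv')
      · have hf : shiftStep (ns, ch, none) i = (ns, ch, none) := by
          simp only [shiftStep, ha, Bool.false_eq_true, if_false]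
          rw [if_neg he]
        have hg : gStep (ns, ch) i = (ns, ch) := by
          simp only [gStep]
          rw [if_neg he]
        rw [List.foldl_cons, hf, List.foldl_cons, hg]
        exact ih _ _ hv'

-- ===== VERDICT (by name: the statement is the Claim_ definition above) =====
theorem shift_prev_spec : Claim_equal_shift_prev := by
  intro nums _
  unfold Spec_shift_prev
  match nums with
  | [] => rfl
  | x :: xs =>
    have hv : ∀ i ∈ List.range' 1 xs.length, 1 ≤ i ∧ i < (x :: xs).length := by
      intro i hi
      have := List.mem_range'.mp hi
      simp only [List.length_cons]
      omega
    have h1 : shift_prev (x :: xs)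
        = res3 ((List.range' 1 xs.length).foldl shiftStep (x :: xs, 0, none)) := by
      simp [shift_prev, res3]
    have h2 := ffold_eq_gfold (List.range' 1 xs.length) (x :: xs) 0 hv
    have h3 := gfold_eq xs [] x 0
    simp only [List.length_nil, Nat.zero_add, List.nil_append] at h3
    rw [h1, h2, h3]
    simp [shift_prev_alt, bfold_eq]
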